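-- pv_equiv track=rewrite | github.com/andreakbarreiro/voter_timelines | audit_address_changes.py | _ever_s_to_v
-- ===== SOURCE A (Python) =====
-- from typing import List, Set
--
-- def _ever_s_to_v(row_statuses: List[str]) -> bool:
--     seen_s = False
--     for val in row_statuses:
--         if not isinstance(val, str):
--             continue
--         v = val.strip().upper()
--         if v == "S":
--             seen_s = True
--         elif v == "V" and seen_s:
--             return True
--     return False
-- ===== SOURCE B (Python) =====
-- def _ever_s_to_v(row_statuses):
--     norm = [v.strip().upper() for v in row_statuses if isinstance(v, str)]
--     if "S" not in norm:
--         return False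
--     i = norm.index("S")
--     return "V" in norm[i + 1:]
-- ===== Notes on version B (the rewrite author's own statement) =====
-- stated objective: simpler
-- what changed: Replaces the stateful early-exit flag loop by a declarative decomposition: normalize the whole list once, find the first 'S' with index, then test membership of 'V' in the suffix after it.
import Mathlib
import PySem

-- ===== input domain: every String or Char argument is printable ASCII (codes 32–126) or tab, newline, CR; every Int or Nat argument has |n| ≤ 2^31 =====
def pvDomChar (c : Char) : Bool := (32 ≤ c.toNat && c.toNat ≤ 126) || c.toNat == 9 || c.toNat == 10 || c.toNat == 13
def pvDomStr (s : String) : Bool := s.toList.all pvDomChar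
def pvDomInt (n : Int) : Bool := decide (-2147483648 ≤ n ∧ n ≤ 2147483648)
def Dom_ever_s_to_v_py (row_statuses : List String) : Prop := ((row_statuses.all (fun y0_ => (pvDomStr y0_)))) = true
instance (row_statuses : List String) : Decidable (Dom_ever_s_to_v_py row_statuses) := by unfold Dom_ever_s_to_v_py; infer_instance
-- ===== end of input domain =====

-- B computes the same result by a find-first-'S'-then-scan-the-suffix-for-'V' decomposition
-- over a pre-normalized list, instead of A's stateful early-exit flag loop (objective: simpler).

-- ===== PORT A =====
-- A's loop, carrying the seen_s flag; isinstance(val, str) is always true on List String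
def everSVLoop : List String → Bool → Bool
  | [], _ => false
  | val :: rest, seen_s =>
    let v := PySem.Str.upper (PySem.Str.strip val)
    if v = "S" then everSVLoop rest true
    else if v = "V" ∧ seen_s then true
    else everSVLoop rest seen_s

def ever_s_to_v_py (row_statuses : List String) : Bool :=
  everSVLoop row_statuses false

-- ===== PORT B =====
def ever_s_to_v_py_alt (row_statuses : List String) : Bool :=
  let norm := row_statuses.map (fun v => PySem.Str.upper (PySem.Str.strip v))
  match PySem.List.index? norm "S" with
  | none => false
  | some i => decide ("V" ∈ PySem.List.slice norm (some ((i : Int) + 1)) none)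

-- ===== PRECONDITION & SPEC =====
def Spec_ever_s_to_v_py (row_statuses : List String) (out : Bool) : Prop := out = ever_s_to_v_py_alt row_statuses
instance (row_statuses : List String) (out : Bool) : Decidable (Spec_ever_s_to_v_py row_statuses out) := by unfold Spec_ever_s_to_v_py; infer_instance

-- ===== CLAIM (what is proved, stated in full; the proofs are below) =====
def Claim_equal_ever_s_to_v_py : Prop := ∀ (row_statuses : List String), Dom_ever_s_to_v_py row_statuses → Spec_ever_s_to_v_py row_statuses (ever_s_to_v_py row_statuses)

-- ===== LEMMAS AND PROOFS =====

-- the normalized list B builds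
def pvNorm (xs : List String) : List String :=
  xs.map (fun v => PySem.Str.upper (PySem.Str.strip v))

-- B's port, re-expressed with the slice turned into List.drop
theorem alt_eq (xs : List String) :
    ever_s_to_v_py_alt xs =
      (match PySem.List.index? (pvNorm xs) "S" with
       | none => false
       | some i => decide ("V" ∈ (pvNorm xs).drop (i + 1))) := by
  simp only [ever_s_to_v_py_alt, pvNorm]
  cases h : PySem.List.index? (xs.map (fun v => PySem.Str.upper (PySem.Str.strip v))) "S" with
  | none => simp
  | some i =>
    simp only [h]
    have h1 : ((i : Int) + 1) = (((i + 1 : Nat)) : Int) := by push_cast; ring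
    rw [h1, PySem.List.slice_from_natCast]
    rfl

-- once seen_s is true, A's loop just scans the rest for a "V"
theorem everSVLoop_true (xs : List String) :
    everSVLoop xs true = decide ("V" ∈ pvNorm xs) := by
  induction xs with
  | nil => simp [everSVLoop, pvNorm]
  | cons x r ih =>
    simp only [everSVLoop, pvNorm, List.map_cons, List.mem_cons]
    by_cases hS : PySem.Str.upper (PySem.Str.strip x) = "S"
    · have hV : "V" ≠ PySem.Str.upper (PySem.Str.strip x) := by simp [hS]
      simp [hS, ih, pvNorm]
    · by_cases hV : PySem.Str.upper (PySem.Str.strip x) = "V"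
      · simp [hV]
      · have hV' : "V" ≠ PySem.Str.upper (PySem.Str.strip x) := fun h => hV h.symm
        simp [hS, hV, hV', ih, pvNorm]

theorem everSVLoop_false (xs : List String) :
    everSVLoop xs false = ever_s_to_v_py_alt xs := by
  rw [alt_eq]
  induction xs with
  | nil => simp [everSVLoop, pvNorm, PySem.List.index?]
  | cons x r ih =>
    by_cases hS : PySem.Str.upper (PySem.Str.strip x) = "S"
    · have hidx : PySem.List.index? (pvNorm (x :: r)) "S" = some 0 := by
        simp only [pvNorm, List.map_cons, hS]
        exact PySem.List.index?_cons_self _ _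
      rw [hidx]
      simp only [everSVLoop, hS, everSVLoop_true, pvNorm, List.map_cons,
        Nat.zero_add, List.drop_succ_cons, List.drop_zero]
      simp
    · have hidx : PySem.List.index? (pvNorm (x :: r)) "S"
          = (PySem.List.index? (pvNorm r) "S").map (· + 1) := by
        simp only [pvNorm, List.map_cons]
        exact PySem.List.index?_cons_of_ne _ hS
      rw [hidx]
      simp only [everSVLoop, if_neg hS]
      rw [ih]
      cases h : PySem.List.index? (pvNorm r) "S" with
      | none => simp
      | some i =>
        simp only [Option.map_some]
        simp [pvNorm, List.drop_succ_cons]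

-- ===== VERDICT (by name: the statement is the Claim_ definition above) =====
theorem ever_s_to_v_py_spec : Claim_equal_ever_s_to_v_py := by
  intro xs _
  show ever_s_to_v_py xs = ever_s_to_v_py_alt xs
  exact everSVLoop_false xs
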